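-- pv_equiv track=rewrite | github.com/SimonTanner/BioDesic-Pattern-Fitter | Biodesic Fit_Version_1.py | face_find
-- ===== SOURCE A (Python) =====
-- def face_find(data, vert_1_no, vert_2_no, i):
--
--     joined = []
--     joined_faces = []
--
--     for n in range(0, len(data[2])):
--
--         if i != n:
--
--             while True:
--
--                 try:
--
--                     data[2][n].index(vert_1_no + 1)
--                     joined.append(n+1)
--
--
--                 except ValueError:
--
--                     break
--
--                 except IndexError:
--
--                     break
--
--                 else:
--
--                     break
--
--
--     for m in range(0, len(joined)):
--
--         while True:
--
--                 try:
--
--                     data[2][joined[m] - 1].index(vert_2_no + 1)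
--                     joined_faces.append(joined[m])
--
--
--
--                 except ValueError:
--
--                     break
--
--                 except IndexError:
--
--                     break
--
--                 else:
--
--                     break
--
--     return(joined_faces)
-- ===== SOURCE B (Python) =====
-- def face_find(data, vert_1_no, vert_2_no, i):
--     faces = data[2]
--     return [n + 1
--             for n in range(len(faces))
--             if n != i
--             and (vert_1_no + 1) in faces[n]
--             and (vert_2_no + 1) in faces[n]]
-- ===== Notes on version B (the rewrite author's own statement) =====
-- stated objective: simpler
-- what changed: Replaces A's two sequential passes (build a candidate list via try/except .index, then rescan it re-indexing data[2][joined[m]-1]) with one fused comprehension over range(len(data[2])) using the 'in' operator, dropping the intermediate list.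
import Mathlib
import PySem

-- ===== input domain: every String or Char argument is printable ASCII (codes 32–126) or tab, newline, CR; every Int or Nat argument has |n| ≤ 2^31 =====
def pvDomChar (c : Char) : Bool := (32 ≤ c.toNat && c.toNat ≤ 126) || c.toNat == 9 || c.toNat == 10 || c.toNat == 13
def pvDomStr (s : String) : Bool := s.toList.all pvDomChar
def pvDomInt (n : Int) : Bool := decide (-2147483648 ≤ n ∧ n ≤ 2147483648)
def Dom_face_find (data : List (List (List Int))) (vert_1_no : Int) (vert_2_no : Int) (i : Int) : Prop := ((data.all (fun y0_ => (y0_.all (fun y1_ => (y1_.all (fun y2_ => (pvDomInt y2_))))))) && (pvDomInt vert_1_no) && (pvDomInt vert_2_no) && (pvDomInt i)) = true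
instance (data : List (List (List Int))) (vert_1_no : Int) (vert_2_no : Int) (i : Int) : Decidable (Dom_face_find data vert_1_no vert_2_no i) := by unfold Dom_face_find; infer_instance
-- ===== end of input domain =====

-- B fuses A's two filtering passes (candidate list via .index/try-except, then rescan) into one comprehension using 'in'; objective: simpler.


-- ===== PORT A =====
-- literal port of A: first loop builds `joined` (n+1 for n ≠ i with vert_1_no+1 in data[2][n],
-- membership tested via .index / try-except → index?.isSome); second loop rescans data[2][joined[m]-1].
def face_find (data : List (List (List Int))) (vert_1_no : Int) (vert_2_no : Int) (i : Int) : List Int :=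
  let faces := (PySem.List.pyGet? data 2).getD []
  let joined := (List.range faces.length).foldl (fun (acc : List Int) (n : Nat) =>
    if i ≠ (n : Int) then
      if (PySem.List.index? ((PySem.List.pyGet? faces (n : Int)).getD []) (vert_1_no + 1)).isSome then
        acc ++ [(n : Int) + 1]
      else acc
    else acc) []
  joined.foldl (fun acc m =>
    if (PySem.List.index? ((PySem.List.pyGet? faces (m - 1)).getD []) (vert_2_no + 1)).isSome then
      acc ++ [m]
    else acc) []

-- ===== PORT B =====
-- literal port of B: one fused comprehension over range(len(data[2])) with 'in' tests.
def face_find_alt (data : List (List (List Int))) (vert_1_no : Int) (vert_2_no : Int) (i : Int) : List Int :=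
  let faces := (PySem.List.pyGet? data 2).getD []
  (List.range faces.length).filterMap (fun (n : Nat) =>
    if (n : Int) ≠ i ∧ (vert_1_no + 1) ∈ ((PySem.List.pyGet? faces (n : Int)).getD [])
        ∧ (vert_2_no + 1) ∈ ((PySem.List.pyGet? faces (n : Int)).getD []) then
      some ((n : Int) + 1)
    else none)

-- ===== PRECONDITION & SPEC =====
-- Pre_ excludes exactly the inputs where A raises IndexError on data[2] (fewer than three sublists).
def Pre_face_find (data : List (List (List Int))) (vert_1_no : Int) (vert_2_no : Int) (i : Int) : Prop := 3 ≤ data.length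
instance (data : List (List (List Int))) (vert_1_no : Int) (vert_2_no : Int) (i : Int) : Decidable (Pre_face_find data vert_1_no vert_2_no i) := by unfold Pre_face_find; infer_instance
def pvWitness_face_find : List (List (List Int)) × Int × Int × Int := ([[], [], [[1, 2], [2, 3]]], 0, 1, 0)
def Spec_face_find (data : List (List (List Int))) (vert_1_no : Int) (vert_2_no : Int) (i : Int) (out : List Int) : Prop := out = face_find_alt data vert_1_no vert_2_no i
instance (data : List (List (List Int))) (vert_1_no : Int) (vert_2_no : Int) (i : Int) (out : List Int) : Decidable (Spec_face_find data vert_1_no vert_2_no i out) := by unfold Spec_face_find; infer_instance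

-- ===== CLAIM (what is proved, stated in full; the proofs are below) =====
def Claim_equal_face_find : Prop := ∀ (data : List (List (List Int))) (vert_1_no : Int) (vert_2_no : Int) (i : Int), Dom_face_find data vert_1_no vert_2_no i → Pre_face_find data vert_1_no vert_2_no i → Spec_face_find data vert_1_no vert_2_no i (face_find data vert_1_no vert_2_no i)

-- ===== LEMMAS AND PROOFS =====

theorem filterMap_if_eq_map_filter {α β : Type} (p : α → Prop) [DecidablePred p] (f : α → β)
    (l : List α) :
    l.filterMap (fun x => if p x then some (f x) else none) = (l.filter (fun x => decide (p x))).map f := by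
  induction l with
  | nil => rfl
  | cons a t ih =>
    by_cases h : p a <;> simp [h, ih]

theorem face_find_spec' (data : List (List (List Int))) (vert_1_no : Int) (vert_2_no : Int)
    (i : Int) :
    face_find data vert_1_no vert_2_no i = face_find_alt data vert_1_no vert_2_no i := by
  simp only [face_find, face_find_alt]
  generalize (PySem.List.pyGet? data 2).getD [] = faces
  -- loop 1 of A builds `joined` = filtered-and-mapped range
  have step1 : ∀ (l : List Nat) (acc : List Int),
      l.foldl (fun (acc : List Int) (n : Nat) =>
        if i ≠ (n : Int) then
          if (PySem.List.index? ((PySem.List.pyGet? faces (n : Int)).getD []) (vert_1_no + 1)).isSome then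
            acc ++ [(n : Int) + 1]
          else acc
        else acc) acc
      = acc ++ (l.filter (fun (n : Nat) => decide (i ≠ (n : Int)) && (PySem.List.index? ((PySem.List.pyGet? faces (n : Int)).getD []) (vert_1_no + 1)).isSome)).map (fun (n : Nat) => (n : Int) + 1) := by
    intro l
    induction l with
    | nil => intro acc; simp
    | cons a t ih =>
      intro acc
      simp only [List.foldl_cons, List.filter_cons]
      by_cases h1 : i ≠ (a : Int)
      · by_cases h2 : (PySem.List.index? ((PySem.List.pyGet? faces (a : Int)).getD []) (vert_1_no + 1)).isSome = true
        · have hc : (decide (i ≠ (a : Int)) && (PySem.List.index? ((PySem.List.pyGet? faces (a : Int)).getD []) (vert_1_no + 1)).isSome) = true := by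
            rw [h2, Bool.and_true]
            exact decide_eq_true h1
          rw [if_pos h1, if_pos h2, ih, if_pos hc, List.map_cons, List.append_assoc]
          rfl
        · have h2' : (PySem.List.index? ((PySem.List.pyGet? faces (a : Int)).getD []) (vert_1_no + 1)).isSome = false := by
            revert h2
            cases (PySem.List.index? ((PySem.List.pyGet? faces (a : Int)).getD []) (vert_1_no + 1)).isSome <;> simp
          have hc : ¬ ((decide (i ≠ (a : Int)) && (PySem.List.index? ((PySem.List.pyGet? faces (a : Int)).getD []) (vert_1_no + 1)).isSome) = true) := by
            rw [h2', Bool.and_false]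
            exact Bool.false_ne_true
          rw [if_pos h1, if_neg h2, ih, if_neg hc]
      · have hc : ¬ ((decide (i ≠ (a : Int)) && (PySem.List.index? ((PySem.List.pyGet? faces (a : Int)).getD []) (vert_1_no + 1)).isSome) = true) := by
          rw [decide_eq_false h1, Bool.false_and]
          exact Bool.false_ne_true
        rw [if_neg h1, ih, if_neg hc]
  -- loop 2 of A filters `joined`
  have step2 : ∀ (l acc : List Int),
      l.foldl (fun (acc : List Int) (m : Int) =>
        if (PySem.List.index? ((PySem.List.pyGet? faces (m - 1)).getD []) (vert_2_no + 1)).isSome then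
          acc ++ [m]
        else acc) acc
      = acc ++ l.filter (fun (m : Int) => (PySem.List.index? ((PySem.List.pyGet? faces (m - 1)).getD []) (vert_2_no + 1)).isSome) := by
    intro l
    induction l with
    | nil => intro acc; simp
    | cons a t ih =>
      intro acc
      simp only [List.foldl_cons, List.filter_cons]
      by_cases h : (PySem.List.index? ((PySem.List.pyGet? faces (a - 1)).getD []) (vert_2_no + 1)).isSome = true
      · rw [if_pos h, ih, if_pos h, List.append_assoc]
        rfl
      · rw [if_neg h, ih, if_neg h]
  rw [step1, step2, List.nil_append, List.nil_append, List.filter_map,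
    List.filter_filter, filterMap_if_eq_map_filter]
  apply congrArg (List.map _)
  apply List.filter_congr
  intro n hn
  have hlt : n < faces.length := List.mem_range.mp hn
  have e1 : PySem.List.pyGet? faces ((n : Nat) : Int) = some faces[n] := by
    rw [PySem.List.pyGet?_natCast]
    exact List.getElem?_eq_getElem hlt
  have e2 : ((n : Nat) : Int) + 1 - 1 = ((n : Nat) : Int) := by ring
  have hne : (i ≠ ((n : Nat) : Int)) ↔ (((n : Nat) : Int) ≠ i) := ne_comm
  rw [Bool.eq_iff_iff]
  simp only [Function.comp, e2, e1, Option.getD_some, Bool.and_eq_true,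
    decide_eq_true_eq, PySem.List.index?_isSome_iff, hne]
  tauto

-- ===== VERDICT (by name: the statement is the Claim_ definition above) =====
theorem face_find_spec : Claim_equal_face_find := by
  intro data v1 v2 i _ _
  exact face_find_spec' data v1 v2 i
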